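-- pv_equiv track=rewrite | github.com/carrdelling/topcoder | dp/repeat_string_easy.py | solve
-- ===== SOURCE A (Python) =====
-- def solve(args):
--     """ Iterate over all possible ways of splitting the string in two words
--
--         Then, for each split, compute the maximum common substring.
--
--         Output is the overall maximum found * 2, since the problem is asking
--         for the longest square.
--     """
--
--     string = args
--     best = 0
--
--     for k in range(1, len(string)):
--
--         first = string[:k]
--         second = string[k:]
--
--         if len(second) <= best:
--             break
--
--         mem = {}
--         maximum = 0
--         if len(first) > len(second):
--             second, first = first, second
--
--         for i in range(len(first)):
--             for j in range(len(second)):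
--                 if first[i] == second[j]:
--                     value = mem.get((i-1, j-1), 0) + 1
--                 else:
--                     value = max(mem.get((i-1, j), 0), mem.get((i, j-1), 0))
--                 mem[(i, j)] = value
--                 maximum = max(maximum, value)
--
--         best = max(best, maximum)
--
--     return 2 * best
-- ===== SOURCE B (Python) =====
-- def solve(args):
--     """ Same answer (longest square subsequence = 2 * max over splits of
--         LCS(prefix, suffix)), but each split's LCS is computed by the
--         Hunt-Szymanski / patience method: index the shorter side's character
--         positions once, then for each character of the longer side process its
--         match positions in decreasing order, maintaining a strictly increasing
--         tails list (tails[t] = least end position of a common subsequence of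
--         length t+1); the LCS length is len(tails).  No (i, j) DP table at all.
--     """
--     s = args
--     best = 0
--     for k in range(1, len(s)):
--         first = s[:k]
--         second = s[k:]
--         if len(second) <= best:
--             break
--         if len(first) > len(second):
--             first, second = second, first
--         occ = {}
--         for i, c in enumerate(first):
--             occ.setdefault(c, []).append(i)
--         tails = []
--         for c in second:
--             for i in reversed(occ.get(c, [])):
--                 for idx in range(len(tails)):
--                     if tails[idx] >= i:
--                         tails[idx] = i
--                         break
--                 else:
--                     tails.append(i)
--         if len(tails) > best:
--             best = len(tails)
--     return 2 * best
-- ===== Notes on version B (the rewrite author's own statement) =====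
-- stated objective: faster
-- what changed: Each split's LCS is computed by the Hunt-Szymanski / patience method -- index the shorter side's character occurrences once, then maintain a strictly increasing tails list of minimal end positions while scanning the longer side's match positions in decreasing order -- instead of A's full (i,j) DP table in a dict with a running maximum.
import Mathlib
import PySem

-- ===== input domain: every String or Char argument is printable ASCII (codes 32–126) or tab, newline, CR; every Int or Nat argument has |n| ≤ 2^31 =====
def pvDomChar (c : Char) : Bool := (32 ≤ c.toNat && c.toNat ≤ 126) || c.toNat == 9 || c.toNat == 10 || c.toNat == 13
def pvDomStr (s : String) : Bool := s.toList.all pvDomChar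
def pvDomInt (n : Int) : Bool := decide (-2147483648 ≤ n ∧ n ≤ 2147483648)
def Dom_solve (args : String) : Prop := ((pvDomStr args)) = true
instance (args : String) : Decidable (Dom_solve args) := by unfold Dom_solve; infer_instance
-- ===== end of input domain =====

-- B replaces A's per-split (i,j) LCS table (a dict with a running maximum) by the
-- Hunt–Szymanski / patience method: an occurrence index of the shorter side plus a
-- strictly increasing tails list of minimal end positions; measurably faster.

-- ===== PORT A =====
-- one inner step: the body of A's `for j in range(len(second))` loop (state = (mem, maximum))
def innerStepA (first second : List Char) (i : Int)
    (st : PySem.Dict (Int × Int) Int × Int) (j : Int) : PySem.Dict (Int × Int) Int × Int :=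
  let value : Int :=
    if PySem.List.pyGetD first i ' ' = PySem.List.pyGetD second j ' ' then
      st.1.getD (i - 1, j - 1) 0 + 1
    else
      max (st.1.getD (i - 1, j) 0) (st.1.getD (i, j - 1) 0)
  (st.1.insert (i, j) value, max st.2 value)

-- A's `for i in range(len(first))` row loop
def rowFoldA (first second : List Char)
    (st : PySem.Dict (Int × Int) Int × Int) (i : Int) : PySem.Dict (Int × Int) Int × Int :=
  (PySem.List.pyRange 0 (PySem.List.len second) 1).foldl (innerStepA first second i) st

-- the whole `mem = {}` … double loop; returns `maximum`
def innerA (first second : List Char) : Int :=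
  ((PySem.List.pyRange 0 (PySem.List.len first) 1).foldl (rowFoldA first second)
    (PySem.Dict.empty, 0)).2

-- A's `for k in range(1, len(string))` loop with its break; returns `best`
def solveLoopA (s : List Char) (ks : List Int) (best : Int) : Int :=
  match ks with
  | [] => best
  | k :: rest =>
    let first := PySem.List.slice s none (some k)
    let second := PySem.List.slice s (some k) none
    if PySem.List.len second ≤ best then best
    else
      let p := if PySem.List.len first > PySem.List.len second then (second, first) else (first, second)
      let maximum := innerA p.1 p.2
      solveLoopA s rest (max best maximum)

def solve (args : String) : Int :=
  2 * solveLoopA args.toList (PySem.List.pyRange 1 (PySem.List.len args.toList) 1) 0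

-- ===== PORT B =====
-- `for idx in range(len(tails)): if tails[idx] >= i: tails[idx] = i; break / else: append`
def place : List Int → Int → List Int
  | [], i => [i]
  | t :: ts, i => if i ≤ t then i :: ts else t :: place ts i

-- `occ = {}; for i, c in enumerate(first): occ.setdefault(c, []).append(i)`
def buildOcc (first : List Char) : PySem.Dict Char (List Int) :=
  (PySem.List.enumerate first 0).foldl
    (fun d ic => d.insert ic.2 (d.getD ic.2 [] ++ [ic.1])) PySem.Dict.empty

-- `for i in reversed(occ.get(c, [])): <place i into tails>`
def procCharHS (occ : PySem.Dict Char (List Int)) (tails : List Int) (c : Char) : List Int :=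
  ((occ.getD c []).reverse).foldl place tails

-- one split's Hunt–Szymanski LCS: `tails = []; for c in second: …; len(tails)`
def innerHS (first second : List Char) : Int :=
  PySem.List.len (second.foldl (procCharHS (buildOcc first)) ([] : List Int))

def solveLoopB (s : List Char) (ks : List Int) (best : Int) : Int :=
  match ks with
  | [] => best
  | k :: rest =>
    let first := PySem.List.slice s none (some k)
    let second := PySem.List.slice s (some k) none
    if PySem.List.len second ≤ best then best
    else
      let p := if PySem.List.len first > PySem.List.len second then (second, first) else (first, second)
      let v := innerHS p.1 p.2
      solveLoopB s rest (if v > best then v else best)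

def solve_alt (args : String) : Int :=
  2 * solveLoopB args.toList (PySem.List.pyRange 1 (PySem.List.len args.toList) 1) 0

-- ===== PRECONDITION & SPEC =====
def Spec_solve (args : String) (out : Int) : Prop := out = solve_alt args
instance (args : String) (out : Int) : Decidable (Spec_solve args out) := by unfold Spec_solve; infer_instance

-- ===== CLAIM (what is proved, stated in full; the proofs are below) =====
def Claim_equal_solve : Prop := ∀ (args : String), Dom_solve args → Spec_solve args (solve args)

-- ===== LEMMAS AND PROOFS =====

def lcsT (x y : List Char) : Nat → Nat → Nat
  | 0, _ => 0
  | _ + 1, 0 => 0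
  | i + 1, j + 1 =>
    if x.getD i ' ' = y.getD j ' ' then lcsT x y i j + 1
    else max (lcsT x y i (j + 1)) (lcsT x y (i + 1) j)
  termination_by i j => i + j

lemma lcsT_zero_left (x y : List Char) (j : Nat) : lcsT x y 0 j = 0 := by
  simp [lcsT]

lemma lcsT_zero_right (x y : List Char) (i : Nat) : lcsT x y i 0 = 0 := by
  cases i <;> simp [lcsT]

lemma lcsT_succ_succ (x y : List Char) (i j : Nat) :
    lcsT x y (i + 1) (j + 1) =
      if x.getD i ' ' = y.getD j ' ' then lcsT x y i j + 1
      else max (lcsT x y i (j + 1)) (lcsT x y (i + 1) j) := by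
  rw [lcsT]

lemma lcsT_bundle (x y : List Char) :
    ∀ s i j, i + j ≤ s →
      lcsT x y i j ≤ lcsT x y (i + 1) j ∧ lcsT x y i j ≤ lcsT x y i (j + 1) ∧
      lcsT x y (i + 1) j ≤ lcsT x y i j + 1 ∧ lcsT x y i (j + 1) ≤ lcsT x y i j + 1 := by
  intro s
  induction s with
  | zero =>
    intro i j h
    have hi : i = 0 := by omega
    have hj : j = 0 := by omega
    subst hi hj
    simp [lcsT_zero_left, lcsT_zero_right]
  | succ s ih =>
    intro i j h
    refine ⟨?_, ?_, ?_, ?_⟩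
    · cases j with
      | zero => simp [lcsT_zero_right]
      | succ j' =>
        rw [lcsT_succ_succ]
        split_ifs with hc
        · exact le_trans (ih i j' (by omega)).2.2.2 le_rfl
        · exact le_max_left _ _
    · cases i with
      | zero => simp [lcsT_zero_left]
      | succ i' =>
        rw [lcsT_succ_succ]
        split_ifs with hc
        · exact (ih i' j (by omega)).2.2.1
        · exact le_max_right _ _
    · cases j with
      | zero => simp [lcsT_zero_right]
      | succ j' =>
        rw [lcsT_succ_succ]
        split_ifs with hc
        · exact Nat.succ_le_succ (ih i j' (by omega)).2.1
        · exact max_le (Nat.le_succ _)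
            (le_trans (ih i j' (by omega)).2.2.1 (Nat.succ_le_succ (ih i j' (by omega)).2.1))
    · cases i with
      | zero => simp [lcsT_zero_left]
      | succ i' =>
        rw [lcsT_succ_succ]
        split_ifs with hc
        · exact Nat.succ_le_succ (ih i' j (by omega)).1
        · exact max_le
            (le_trans (ih i' j (by omega)).2.2.2 (Nat.succ_le_succ (ih i' j (by omega)).1))
            (Nat.le_succ _)

lemma lcsT_mono_left (x y : List Char) (i j : Nat) : lcsT x y i j ≤ lcsT x y (i + 1) j :=
  (lcsT_bundle x y (i + j) i j le_rfl).1

lemma lcsT_mono_right (x y : List Char) (i j : Nat) : lcsT x y i j ≤ lcsT x y i (j + 1) :=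
  (lcsT_bundle x y (i + j) i j le_rfl).2.1

lemma lcsT_mono_left' (x y : List Char) {i i' : Nat} (h : i ≤ i') (j : Nat) :
    lcsT x y i j ≤ lcsT x y i' j := by
  induction i' with
  | zero => have : i = 0 := by omega
            subst this; exact le_rfl
  | succ i'' ih =>
    rcases Nat.lt_or_ge i (i'' + 1) with h' | h'
    · exact le_trans (ih (by omega)) (lcsT_mono_left x y i'' j)
    · have : i = i'' + 1 := by omega
      subst this; exact le_rfl

-- ===== A side: the dict DP computes the prefix-LCS table, its running max the corner =====

def memFun (x y : List Char) (i j : Nat) (p : Int × Int) : Int :=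
  if 0 ≤ p.1 ∧ 0 ≤ p.2 ∧
      ((p.1.toNat < i ∧ p.2.toNat < y.length) ∨ (p.1.toNat = i ∧ p.2.toNat < j)) then
    ((lcsT x y (p.1.toNat + 1) (p.2.toNat + 1) : Nat) : Int)
  else 0

def InvA (x y : List Char) (i j : Nat) (st : PySem.Dict (Int × Int) Int × Int) : Prop :=
  (∀ p, st.1.getD p 0 = memFun x y i j p) ∧
  st.2 = ((max (lcsT x y i y.length) (lcsT x y (i + 1) j) : Nat) : Int)

lemma stepA_inv (x y : List Char) (i j : Nat) (hi : i < x.length) (hj : j < y.length)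
    (st : PySem.Dict (Int × Int) Int × Int) (h : InvA x y i j st) :
    InvA x y i (j + 1) (innerStepA x y (i : Int) st (j : Int)) := by
  obtain ⟨hmem, hmax⟩ := h
  have f1 : st.1.getD ((i : Int) - 1, (j : Int) - 1) 0 = ((lcsT x y i j : Nat) : Int) := by
    rw [hmem]; unfold memFun
    rcases Nat.eq_zero_or_pos i with hi0 | hip
    · subst hi0
      split_ifs with hc
      · exfalso; omega
      · rw [lcsT_zero_left]; rfl
    · rcases Nat.eq_zero_or_pos j with hj0 | hjp
      · subst hj0
        split_ifs with hc
        · exfalso; omega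
        · rw [lcsT_zero_right]; rfl
      · split_ifs with hc
        · have e1 : ((i : Int) - 1).toNat + 1 = i := by omega
          have e2 : ((j : Int) - 1).toNat + 1 = j := by omega
          rw [e1, e2]
        · exfalso; apply hc
          refine ⟨by omega, by omega, Or.inl ⟨by omega, by omega⟩⟩
  have f2 : st.1.getD ((i : Int) - 1, (j : Int)) 0 = ((lcsT x y i (j + 1) : Nat) : Int) := by
    rw [hmem]; unfold memFun
    rcases Nat.eq_zero_or_pos i with hi0 | hip
    · subst hi0
      split_ifs with hc
      · exfalso; omega
      · rw [lcsT_zero_left]; rfl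
    · split_ifs with hc
      · have e1 : ((i : Int) - 1).toNat + 1 = i := by omega
        have e2 : ((j : Int)).toNat + 1 = j + 1 := by omega
        rw [e1, e2]
      · exfalso; apply hc
        refine ⟨by omega, by omega, Or.inl ⟨by omega, by omega⟩⟩
  have f3 : st.1.getD ((i : Int), (j : Int) - 1) 0 = ((lcsT x y (i + 1) j : Nat) : Int) := by
    rw [hmem]; unfold memFun
    rcases Nat.eq_zero_or_pos j with hj0 | hjp
    · subst hj0
      split_ifs with hc
      · exfalso; omega
      · rw [lcsT_zero_right]; rfl
    · split_ifs with hc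
      · have e1 : ((i : Int)).toNat + 1 = i + 1 := by omega
        have e2 : ((j : Int) - 1).toNat + 1 = j := by omega
        rw [e1, e2]
      · exfalso; apply hc
        refine ⟨by omega, by omega, Or.inr ⟨by omega, by omega⟩⟩
  have hv : (if PySem.List.pyGetD x (i : Int) ' ' = PySem.List.pyGetD y (j : Int) ' ' then
        st.1.getD ((i : Int) - 1, (j : Int) - 1) 0 + 1
      else max (st.1.getD ((i : Int) - 1, (j : Int)) 0) (st.1.getD ((i : Int), (j : Int) - 1) 0))
      = ((lcsT x y (i + 1) (j + 1) : Nat) : Int) := by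
    rw [PySem.List.pyGetD_natCast, PySem.List.pyGetD_natCast, lcsT_succ_succ]
    split_ifs with hc
    · rw [f1]; push_cast; ring
    · rw [f2, f3, Nat.cast_max, max_comm]
  have key : ∀ v : Int, v = ((lcsT x y (i + 1) (j + 1) : Nat) : Int) →
      InvA x y i (j + 1) (st.1.insert ((i : Int), (j : Int)) v, max st.2 v) := by
    intro v hveq
    constructor
    · intro p
      show (st.1.insert ((i : Int), (j : Int)) v).getD p 0 = _
      rw [PySem.Dict.getD_insert]
      split_ifs with hp
      · have hp1 : p.1 = (i : Int) := congrArg Prod.fst hp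
        have hp2 : p.2 = (j : Int) := congrArg Prod.snd hp
        rw [hveq]; unfold memFun
        split_ifs with hc
        · have e1 : (p.1).toNat + 1 = i + 1 := by omega
          have e2 : (p.2).toNat + 1 = j + 1 := by omega
          rw [e1, e2]
        · exfalso; apply hc
          refine ⟨by omega, by omega, Or.inr ⟨by omega, by omega⟩⟩
      · simp only [Prod.ext_iff] at hp
        rw [hmem]; unfold memFun
        split_ifs with h1 h2 h2
        · rfl
        · exfalso; omega
        · exfalso; omega
        · rfl
    · show max st.2 v = _
      rw [hmax, hveq]
      have hbc : lcsT x y (i + 1) j ≤ lcsT x y (i + 1) (j + 1) := lcsT_mono_right x y (i + 1) j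
      have hmm : max (max (lcsT x y i y.length) (lcsT x y (i + 1) j)) (lcsT x y (i + 1) (j + 1))
          = max (lcsT x y i y.length) (lcsT x y (i + 1) (j + 1)) := by
        rw [max_assoc, max_eq_right hbc]
      exact_mod_cast congrArg (fun n : Nat => (n : Int)) hmm
  exact key _ hv

lemma memFun_row_end (x y : List Char) (i : Nat) (p : Int × Int) :
    memFun x y i y.length p = memFun x y (i + 1) 0 p := by
  unfold memFun; split_ifs with h1 h2 h2 <;> first | rfl | (exfalso; omega)

lemma rowA_inv (x y : List Char) (i : Nat) (hi : i < x.length) :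
    ∀ d j st, j + d = y.length → InvA x y i j st →
      InvA x y i y.length
        ((PySem.List.pyRange (j : Int) (y.length : Int) 1).foldl (innerStepA x y (i : Int)) st) := by
  intro d
  induction d with
  | zero =>
    intro j st hd h
    have hj : j = y.length := by omega
    subst hj
    rw [PySem.List.pyRange_one_eq_nil le_rfl]
    exact h
  | succ d ih =>
    intro j st hd h
    have hj : (j : Int) < (y.length : Int) := by omega
    rw [PySem.List.pyRange_one_cons hj, List.foldl_cons]
    have hc : ((j : Int) + 1) = ((j + 1 : Nat) : Int) := by push_cast; ring
    rw [hc]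
    exact ih (j + 1) _ (by omega) (stepA_inv x y i j hi (by omega) st h)

lemma outerA_inv (x y : List Char) :
    ∀ d i st, i + d = x.length → InvA x y i 0 st →
      InvA x y x.length 0
        ((PySem.List.pyRange (i : Int) (x.length : Int) 1).foldl (rowFoldA x y) st) := by
  intro d
  induction d with
  | zero =>
    intro i st hd h
    have hi : i = x.length := by omega
    subst hi
    rw [PySem.List.pyRange_one_eq_nil le_rfl]
    exact h
  | succ d ih =>
    intro i st hd h
    have hilt : i < x.length := by omega
    have hi : (i : Int) < (x.length : Int) := by omega
    rw [PySem.List.pyRange_one_cons hi, List.foldl_cons]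
    have hc : ((i : Int) + 1) = ((i + 1 : Nat) : Int) := by push_cast; ring
    rw [hc]
    apply ih (i + 1) _ (by omega)
    have hrow := rowA_inv x y i hilt y.length 0 st (by omega) h
    simp only [Nat.cast_zero] at hrow
    have hstep : (PySem.List.pyRange ((0 : Nat) : Int) (y.length : Int) 1).foldl
        (innerStepA x y (i : Int)) st = rowFoldA x y st (i : Int) := by
      unfold rowFoldA
      simp [PySem.List.len_eq]
    simp only [Nat.cast_zero] at hstep
    rw [← hstep]
    obtain ⟨hm, hx2⟩ := hrow
    constructor
    · intro p; rw [hm p, memFun_row_end]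
    · rw [hx2]
      have h1 : max (lcsT x y i y.length) (lcsT x y (i + 1) y.length) = lcsT x y (i + 1) y.length :=
        max_eq_right (lcsT_mono_left x y i y.length)
      have h2 : max (lcsT x y (i + 1) y.length) (lcsT x y (i + 1 + 1) 0) = lcsT x y (i + 1) y.length := by
        rw [lcsT_zero_right]; exact max_eq_left (Nat.zero_le _)
      rw [h1, h2]

lemma innerA_eq (x y : List Char) :
    innerA x y = ((lcsT x y x.length y.length : Nat) : Int) := by
  unfold innerA
  have h0 : InvA x y 0 0 (PySem.Dict.empty, 0) := by
    constructor
    · intro p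
      rw [PySem.Dict.getD_empty]
      unfold memFun
      split_ifs with hc
      · exfalso; omega
      · rfl
    · rw [lcsT_zero_left, lcsT_zero_right]; rfl
  have := outerA_inv x y x.length 0 (PySem.Dict.empty, 0) (by omega) h0
  simp only [Nat.cast_zero] at this
  have hlen : PySem.List.len x = ((x.length : Nat) : Int) := by simp [PySem.List.len_eq]
  rw [hlen]
  rw [this.2, lcsT_zero_right]
  congr 1
  exact max_eq_left (Nat.zero_le _)

-- ===== B side: Hunt–Szymanski tails list = thresholds of the LCS function =====

def bigmax (l : List Nat) : Nat := l.foldr max 0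

lemma le_bigmax_of_mem {l : List Nat} {a : Nat} (h : a ∈ l) : a ≤ bigmax l := by
  induction l with
  | nil => cases h
  | cons b t ih =>
    rcases List.mem_cons.mp h with h' | h'
    · subst h'; exact le_max_left _ _
    · exact le_trans (ih h') (le_max_right _ _)

lemma bigmax_le {l : List Nat} {K : Nat} (h : ∀ a ∈ l, a ≤ K) : bigmax l ≤ K := by
  induction l with
  | nil => exact Nat.zero_le _
  | cons b t ih =>
    exact max_le (h b (List.mem_cons_self)) (ih fun a ha => h a (List.mem_cons_of_mem _ ha))

lemma bigmax_append (l1 l2 : List Nat) : bigmax (l1 ++ l2) = max (bigmax l1) (bigmax l2) := by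
  induction l1 with
  | nil =>
    simp [bigmax]
  | cons a t ih =>
    simp only [bigmax, List.cons_append, List.foldr_cons] at ih ⊢
    rw [ih, max_assoc]

-- G x y j c b i = value of cell (i, j+1) of the DP where only matches of c at
-- positions ≥ b have been merged in:  max(lcsT i j, max{lcsT p j + 1 : b ≤ p < i, x[p] = c})
def G (x y : List Char) (j : Nat) (c : Char) (b i : Nat) : Nat :=
  max (lcsT x y i j)
    (bigmax (((List.range i).filter (fun p => decide (b ≤ p) && (x.getD p ' ' == c))).map
      (fun p => lcsT x y p j + 1)))

lemma G_top (x y : List Char) (j : Nat) (c : Char) {b i : Nat} (h : i ≤ b) :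
    G x y j c b i = lcsT x y i j := by
  unfold G
  have hnil : ((List.range i).filter (fun p => decide (b ≤ p) && (x.getD p ' ' == c))) = [] := by
    apply List.filter_eq_nil_iff.mpr
    intro p hp
    rw [List.mem_range] at hp
    simp only [Bool.and_eq_true, decide_eq_true_eq, beq_iff_eq, not_and]
    intro hbp
    omega
  rw [hnil]
  simp [bigmax]

lemma G_eq_of_le (x y : List Char) (j : Nat) (c : Char) {b i : Nat} (h : i ≤ b) :
    G x y j c b i = G x y j c (b + 1) i := by
  rw [G_top x y j c h, G_top x y j c (by omega)]

lemma G_ge_F (x y : List Char) (j : Nat) (c : Char) (b i : Nat) :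
    lcsT x y i j ≤ G x y j c b i := le_max_left _ _

lemma G_mono_i (x y : List Char) (j : Nat) (c : Char) (b : Nat) {i i' : Nat} (h : i ≤ i') :
    G x y j c b i ≤ G x y j c b i' := by
  unfold G
  refine max_le (le_trans (lcsT_mono_left' x y h j) (le_max_left _ _))
    (le_trans (bigmax_le ?_) (le_max_right _ _))
  intro a ha
  obtain ⟨p, hp, rfl⟩ := List.mem_map.mp ha
  apply le_bigmax_of_mem
  apply List.mem_map.mpr
  refine ⟨p, ?_, rfl⟩
  rw [List.mem_filter] at hp ⊢
  rw [List.mem_range] at hp ⊢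
  exact ⟨by omega, hp.2⟩

lemma G_anti_b (x y : List Char) (j : Nat) (c : Char) (b i : Nat) :
    G x y j c (b + 1) i ≤ G x y j c b i := by
  unfold G
  refine max_le (le_max_left _ _) (le_trans (bigmax_le ?_) (le_max_right _ _))
  intro a ha
  obtain ⟨p, hp, rfl⟩ := List.mem_map.mp ha
  apply le_bigmax_of_mem
  apply List.mem_map.mpr
  refine ⟨p, ?_, rfl⟩
  rw [List.mem_filter] at hp ⊢
  refine ⟨hp.1, ?_⟩
  have := hp.2
  simp only [Bool.and_eq_true, decide_eq_true_eq] at this ⊢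
  exact ⟨by omega, this.2⟩

lemma G_skip (x y : List Char) (j : Nat) (c : Char) {b : Nat} (hm : ¬ x.getD b ' ' = c) (i : Nat) :
    G x y j c b i = G x y j c (b + 1) i := by
  unfold G
  have hf : List.filter (fun p => decide (b ≤ p) && (x.getD p ' ' == c)) (List.range i)
      = List.filter (fun p => decide (b + 1 ≤ p) && (x.getD p ' ' == c)) (List.range i) := by
    apply List.filter_congr
    intro p _
    by_cases hpb : p = b
    · subst hpb
      have hfb : (x.getD p ' ' == c) = false := by
        rw [beq_eq_false_iff_ne]
        exact hm
      rw [hfb, Bool.and_false, Bool.and_false]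
    · have hdec : decide (b ≤ p) = decide (b + 1 ≤ p) := by
        apply decide_eq_decide.mpr
        omega
      rw [hdec]
  rw [hf]

lemma G_match (x y : List Char) (j : Nat) (c : Char) {b i : Nat}
    (hm : x.getD b ' ' = c) (hbi : b < i) :
    G x y j c b i = max (G x y j c (b + 1) i) (lcsT x y b j + 1) := by
  have hbmem : lcsT x y b j + 1 ≤ G x y j c b i := by
    unfold G
    refine le_trans (le_bigmax_of_mem ?_) (le_max_right _ _)
    apply List.mem_map.mpr
    refine ⟨b, ?_, rfl⟩
    rw [List.mem_filter, List.mem_range]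
    simp only [Bool.and_eq_true, decide_eq_true_eq, beq_iff_eq]
    exact ⟨hbi, le_rfl, hm⟩
  apply le_antisymm
  · unfold G
    apply max_le
    · exact le_trans (G_ge_F x y j c (b + 1) i) (le_max_left _ _)
    · apply bigmax_le
      intro a ha
      obtain ⟨p, hp, rfl⟩ := List.mem_map.mp ha
      rw [List.mem_filter, List.mem_range] at hp
      simp only [Bool.and_eq_true, decide_eq_true_eq, beq_iff_eq] at hp
      by_cases hpb : p = b
      · subst hpb
        exact le_max_right _ _
      · have hin : lcsT x y p j + 1 ≤ G x y j c (b + 1) i := by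
          unfold G
          refine le_trans (le_bigmax_of_mem ?_) (le_max_right _ _)
          apply List.mem_map.mpr
          refine ⟨p, ?_, rfl⟩
          rw [List.mem_filter, List.mem_range]
          simp only [Bool.and_eq_true, decide_eq_true_eq, beq_iff_eq]
          exact ⟨hp.1, by omega, hp.2.2⟩
        exact le_trans hin (le_max_left _ _)
  · exact max_le (G_anti_b x y j c b i) hbmem

lemma G_zero (x y : List Char) (j : Nat) (i : Nat) :
    G x y j (y.getD j ' ') 0 i = lcsT x y i (j + 1) := by
  induction i with
  | zero =>
    rw [G_top x y j _ (Nat.zero_le _), lcsT_zero_left, lcsT_zero_left]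
  | succ i ih =>
    unfold G at ih ⊢
    rw [List.range_succ, List.filter_append, List.map_append]
    rw [bigmax_append]
    rw [lcsT_succ_succ]
    have hb1 : lcsT x y (i + 1) j ≤ lcsT x y i j + 1 := (lcsT_bundle x y (i + 1 + j) i j (by omega)).2.2.1
    have hb2 : lcsT x y i (j + 1) ≤ lcsT x y i j + 1 := (lcsT_bundle x y (i + j + 1) i j (by omega)).2.2.2
    have hb3 : lcsT x y i j ≤ lcsT x y (i + 1) j := lcsT_mono_left x y i j
    by_cases hc : x.getD i ' ' = y.getD j ' '
    · rw [if_pos hc]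
      have hft : (decide (0 ≤ i) && (x.getD i ' ' == y.getD j ' ')) = true := by
        simp only [Bool.and_eq_true, decide_eq_true_eq, beq_iff_eq]
        exact ⟨Nat.zero_le _, hc⟩
      have : List.filter (fun p => decide (0 ≤ p) && (x.getD p ' ' == y.getD j ' ')) [i] = [i] := by
        rw [List.filter_cons, if_pos hft]
        rfl
      rw [this]
      simp only [List.map_cons, List.map_nil]
      have hbs : bigmax [lcsT x y i j + 1] = lcsT x y i j + 1 := by simp [bigmax]
      rw [hbs]
      omega
    · rw [if_neg hc]
      have hff : ¬ ((decide (0 ≤ i) && (x.getD i ' ' == y.getD j ' ')) = true) := by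
        simp only [Bool.and_eq_true, decide_eq_true_eq, beq_iff_eq]
        intro hAnd
        exact hc hAnd.2
      have : List.filter (fun p => decide (0 ≤ p) && (x.getD p ' ' == y.getD j ' ')) [i] = [] := by
        rw [List.filter_cons, if_neg hff]
        rfl
      rw [this]
      simp only [List.map_nil]
      have hbs : bigmax ([] : List Nat) = 0 := rfl
      rw [hbs]
      omega

-- the invariant: tails is the list of thresholds of G
def InvB (x y : List Char) (j : Nat) (c : Char) (b : Nat) (tails : List Int) : Prop :=
  tails.length = G x y j c b x.length ∧
  ∀ v i, i ≤ x.length →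
    (v + 1 ≤ G x y j c b i ↔ v < tails.length ∧ tails.getD v 0 < (i : Int))

lemma getD_set_eq (l : List Int) (w : Nat) (a : Int) (h : w < l.length) :
    (l.set w a).getD w 0 = a := by
  rw [List.getD_eq_getElem?_getD, List.getElem?_set]
  simp [h]

lemma getD_set_ne (l : List Int) (w v : Nat) (a : Int) (h : w ≠ v) :
    (l.set w a).getD v 0 = l.getD v 0 := by
  rw [List.getD_eq_getElem?_getD, List.getD_eq_getElem?_getD, List.getElem?_set]
  simp [h]

lemma getD_append_left (l : List Int) (a : Int) (v : Nat) (h : v < l.length) :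
    (l ++ [a]).getD v 0 = l.getD v 0 := by
  rw [List.getD_eq_getElem?_getD, List.getD_eq_getElem?_getD, List.getElem?_append_left h]

lemma getD_append_last (l : List Int) (a : Int) :
    (l ++ [a]).getD l.length 0 = a := by
  simp

lemma place_eq (p : Int) : ∀ (tails : List Int) (w : Nat),
    w ≤ tails.length →
    (∀ v, v < w → tails.getD v 0 < p) →
    (∀ v, w ≤ v → v < tails.length → p ≤ tails.getD v 0) →
    place tails p = if w < tails.length then tails.set w p else tails ++ [p] := by
  intro tails
  induction tails with
  | nil =>
    intro w hw _ _
    have hw0 : w = 0 := by simpa using hw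
    subst hw0
    simp [place]
  | cons t ts ih =>
    intro w hw hlt hge
    cases w with
    | zero =>
      have hpt : p ≤ t := by
        have := hge 0 le_rfl (by simp)
        simpa using this
      simp [place, hpt]
    | succ w' =>
      have htp : t < p := by
        have := hlt 0 (by omega)
        simpa using this
      have hnot : ¬ p ≤ t := by omega
      simp only [place, if_neg hnot]
      rw [ih w' (by simpa using hw)
        (fun v hv => by have := hlt (v + 1) (by omega); simpa using this)
        (fun v hv1 hv2 => by
          have := hge (v + 1) (by omega) (by simpa using hv2)
          simpa using this)]
      by_cases h : w' < ts.length
      · rw [if_pos h, if_pos (by simpa using Nat.succ_lt_succ h)]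
        rfl
      · rw [if_neg h, if_neg (by simp; omega)]
        rfl

lemma place_step (x y : List Char) (j : Nat) (c : Char) {b : Nat}
    (hb : b < x.length) (hm : x.getD b ' ' = c)
    (tails : List Int) (h : InvB x y j c (b + 1) tails) :
    InvB x y j c b (place tails (b : Int)) := by
  obtain ⟨hlen, hiff⟩ := h
  have hbm : b ≤ x.length := le_of_lt hb
  have hGb : G x y j c (b + 1) b = lcsT x y b j := G_top x y j c (Nat.le_succ b)
  have hwlen : lcsT x y b j ≤ tails.length := by
    rw [hlen]
    exact le_trans (lcsT_mono_left' x y hbm j) (G_ge_F x y j c (b + 1) x.length)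
  have hsmall : ∀ v, v < lcsT x y b j → v < tails.length ∧ tails.getD v 0 < (b : Int) := by
    intro v hv
    exact (hiff v b hbm).mp (by rw [hGb]; omega)
  have hlarge : ∀ v, lcsT x y b j ≤ v → v < tails.length → (b : Int) ≤ tails.getD v 0 := by
    intro v hv1 hv2
    by_contra hcon
    rw [Int.not_le] at hcon
    have := (hiff v b hbm).mpr ⟨hv2, hcon⟩
    rw [hGb] at this
    omega
  have hplace : place tails (b : Int)
      = if lcsT x y b j < tails.length then tails.set (lcsT x y b j) (b : Int)
        else tails ++ [(b : Int)] :=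
    place_eq _ tails (lcsT x y b j) hwlen (fun v hv => (hsmall v hv).2) hlarge
  have hGm : ∀ i, b < i →
      G x y j c b i = max (G x y j c (b + 1) i) (lcsT x y b j + 1) :=
    fun i hi => G_match x y j c hm hi
  have hGle : ∀ i, i ≤ b → G x y j c b i = G x y j c (b + 1) i :=
    fun i hi => G_eq_of_le x y j c hi
  by_cases hwl : lcsT x y b j < tails.length
  · rw [hplace, if_pos hwl]
    constructor
    · rw [List.length_set, hGm x.length hb, ← hlen]
      omega
    · intro v i him
      rw [List.length_set]
      by_cases hib : b < i
      · rw [hGm i hib]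
        rcases Nat.lt_trichotomy v (lcsT x y b j) with hvw | hvw | hvw
        · obtain ⟨hvlen, hvb⟩ := hsmall v hvw
          have hbi : (b : Int) < (i : Int) := by exact_mod_cast hib
          rw [getD_set_ne _ _ _ _ (by omega)]
          constructor
          · intro _
            exact ⟨hvlen, by omega⟩
          · intro _
            omega
        · subst hvw
          rw [getD_set_eq _ _ _ hwl]
          constructor
          · intro _
            exact ⟨hwl, by exact_mod_cast hib⟩
          · intro _
            omega
        · rw [getD_set_ne _ _ _ _ (by omega)]
          have hmax : (v + 1 ≤ max (G x y j c (b + 1) i) (lcsT x y b j + 1))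
              ↔ v + 1 ≤ G x y j c (b + 1) i := by omega
          rw [hmax]
          exact hiff v i him
      · rw [Nat.not_lt] at hib
        rw [hGle i hib]
        by_cases hvw : v = lcsT x y b j
        · subst hvw
          have hmono := G_mono_i x y j c (b + 1) hib
          rw [hGb] at hmono
          constructor
          · intro hL
            omega
          · rintro ⟨_, hgd⟩
            rw [getD_set_eq _ _ _ hwl] at hgd
            have hbge : (b : Int) ≥ (i : Int) := by exact_mod_cast hib
            omega
        · rw [getD_set_ne _ _ _ _ (Ne.symm hvw)]
          exact hiff v i him
  · have hweq : lcsT x y b j = tails.length := by omega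
    rw [hplace, if_neg hwl]
    constructor
    · rw [List.length_append, hGm x.length hb, ← hlen]
      simp
      omega
    · intro v i him
      rw [List.length_append]
      by_cases hib : b < i
      · rw [hGm i hib]
        rcases Nat.lt_trichotomy v (lcsT x y b j) with hvw | hvw | hvw
        · obtain ⟨hvlen, hvb⟩ := hsmall v hvw
          have hbi : (b : Int) < (i : Int) := by exact_mod_cast hib
          rw [getD_append_left _ _ _ hvlen]
          constructor
          · intro _
            exact ⟨by simp; omega, by omega⟩
          · intro _
            omega
        · subst hvw
          rw [hweq, getD_append_last]
          constructor
          · intro _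
            exact ⟨by simp, by exact_mod_cast hib⟩
          · intro _
            omega
        · have hG1 : G x y j c (b + 1) i ≤ tails.length := by
            rw [hlen]
            exact G_mono_i x y j c (b + 1) him
          constructor
          · intro hL
            omega
          · rintro ⟨hvl, _⟩
            simp at hvl
            omega
      · rw [Nat.not_lt] at hib
        rw [hGle i hib]
        have hmono := G_mono_i x y j c (b + 1) hib
        rw [hGb] at hmono
        rcases Nat.lt_trichotomy v (lcsT x y b j) with hvw | hvw | hvw
        · obtain ⟨hvlen, _⟩ := hsmall v hvw
          rw [getD_append_left _ _ _ hvlen]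
          have := hiff v i him
          constructor
          · intro hL
            have := this.mp hL
            exact ⟨by simp; omega, this.2⟩
          · rintro ⟨_, hgd⟩
            exact this.mpr ⟨hvlen, hgd⟩
        · subst hvw
          rw [hweq, getD_append_last]
          constructor
          · intro hL
            omega
          · rintro ⟨_, hgd⟩
            have hbge : (b : Int) ≥ (i : Int) := by exact_mod_cast hib
            omega
        · constructor
          · intro hL
            omega
          · rintro ⟨hvl, _⟩
            simp at hvl
            omega

lemma fold_matches (x y : List Char) (j : Nat) (c : Char) :
    ∀ b tails, b ≤ x.length → InvB x y j c b tails →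
      InvB x y j c 0
        ((((List.range b).filter (fun p => x.getD p ' ' == c)).map
          (fun p : Nat => (p : Int))).reverse.foldl place tails) := by
  intro b
  induction b with
  | zero =>
    intro tails _ hinv
    simpa using hinv
  | succ b ih =>
    intro tails hble hinv
    rw [List.range_succ, List.filter_append, List.map_append, List.reverse_append,
      List.foldl_append]
    by_cases hmb : x.getD b ' ' = c
    · have hf1 : List.filter (fun p => x.getD p ' ' == c) [b] = [b] := by
        rw [List.filter_cons, if_pos (by simpa using hmb)]
        rfl
      rw [hf1]
      simp only [List.map_cons, List.map_nil, List.reverse_singleton, List.foldl_cons,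
        List.foldl_nil]
      exact ih (place tails (b : Int)) (by omega)
        (place_step x y j c (by omega) hmb tails hinv)
    · have hf0 : List.filter (fun p => x.getD p ' ' == c) [b] = [] := by
        rw [List.filter_cons, if_neg (by simpa using hmb)]
        rfl
      rw [hf0]
      simp only [List.map_nil, List.reverse_nil, List.foldl_nil]
      apply ih tails (by omega)
      obtain ⟨h1, h2⟩ := hinv
      refine ⟨?_, ?_⟩
      · rw [G_skip x y j c hmb]
        exact h1
      · intro v i him
        rw [G_skip x y j c hmb i]
        exact h2 v i him

lemma buildOcc_aux (step : PySem.Dict Char (List Int) → Int × Char → PySem.Dict Char (List Int))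
    (hstep : step = fun d ic => d.insert ic.2 (d.getD ic.2 [] ++ [ic.1])) :
    ∀ (x : List Char) (s : Int) (d : PySem.Dict Char (List Int)) (c : Char),
      ((PySem.List.enumerate x s).foldl step d).getD c []
        = d.getD c [] ++ ((List.range x.length).filter (fun p => x.getD p ' ' == c)).map
            (fun p : Nat => s + (p : Int)) := by
  intro x
  induction x with
  | nil =>
    intro s d c
    simp [PySem.List.enumerate_nil]
  | cons a xs ih =>
    intro s d c
    rw [PySem.List.enumerate_cons, List.foldl_cons, ih (s + 1) (step d (s, a)) c, hstep]
    simp only []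
    rw [PySem.Dict.getD_insert]
    have hmapfil : List.filter (fun p => (a :: xs).getD p ' ' == c)
          (List.map Nat.succ (List.range xs.length))
        = List.map Nat.succ (List.filter (fun p => xs.getD p ' ' == c) (List.range xs.length)) := by
      rw [List.filter_map]
      congr 1
    have hmapmap : List.map (fun p : Nat => s + (p : Int))
          (List.map Nat.succ (List.filter (fun p => xs.getD p ' ' == c) (List.range xs.length)))
        = List.map (fun p : Nat => s + 1 + (p : Int))
          (List.filter (fun p => xs.getD p ' ' == c) (List.range xs.length)) := by
      rw [List.map_map]
      apply List.map_congr_left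
      intro p _
      simp only [Function.comp_apply, Nat.succ_eq_add_one]
      push_cast
      ring
    rw [List.length_cons, List.range_succ_eq_map, List.filter_cons, hmapfil]
    simp only [List.getD_cons_zero]
    by_cases hac : a = c
    · subst hac
      rw [if_pos rfl, if_pos (by simp), List.map_cons, hmapmap]
      simp [List.append_assoc]
    · rw [if_neg (fun h => hac h.symm), if_neg (by simpa using hac), hmapmap]

lemma buildOcc_getD (x : List Char) (c : Char) :
    (buildOcc x).getD c []
      = ((List.range x.length).filter (fun p => x.getD p ' ' == c)).map (fun p : Nat => (p : Int)) := by
  unfold buildOcc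
  rw [buildOcc_aux _ rfl x 0 PySem.Dict.empty c, PySem.Dict.getD_empty]
  simp

def Itails (x y : List Char) (j : Nat) (tails : List Int) : Prop :=
  tails.length = lcsT x y x.length j ∧
  ∀ v i, i ≤ x.length →
    (v + 1 ≤ lcsT x y i j ↔ v < tails.length ∧ tails.getD v 0 < (i : Int))

lemma procChar_inv (x y : List Char) (j : Nat) (tails : List Int) (h : Itails x y j tails) :
    Itails x y (j + 1) (procCharHS (buildOcc x) tails (y.getD j ' ')) := by
  unfold procCharHS
  rw [buildOcc_getD x (y.getD j ' ')]
  have h1 : InvB x y j (y.getD j ' ') x.length tails := by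
    obtain ⟨ha, hb⟩ := h
    refine ⟨?_, ?_⟩
    · rw [G_top x y j _ le_rfl]
      exact ha
    · intro v i him
      rw [G_top x y j _ him]
      exact hb v i him
  obtain ⟨ha, hb⟩ := fold_matches x y j (y.getD j ' ') x.length tails le_rfl h1
  rw [G_zero x y j x.length] at ha
  refine ⟨ha, ?_⟩
  intro v i him
  rw [← G_zero x y j i]
  exact hb v i him

lemma foldHS_inv (x y : List Char) :
    ∀ (l : List Char) (j : Nat) (tails : List Int), l = y.drop j → j + l.length = y.length →
      Itails x y j tails →
      Itails x y y.length (l.foldl (procCharHS (buildOcc x)) tails) := by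
  intro l
  induction l with
  | nil =>
    intro j tails hdrop hlen hinv
    simp only [List.length_nil, Nat.add_zero] at hlen
    rw [List.foldl_nil]
    rw [hlen] at hinv
    exact hinv
  | cons c l' ih =>
    intro j tails hdrop hlen hinv
    have hjlt : j < y.length := by simp at hlen; omega
    have hget : y.getD j ' ' = c := by
      have h0 : (y.drop j)[0]? = some c := by rw [← hdrop]; rfl
      rw [List.getElem?_drop] at h0
      simp only [Nat.add_zero] at h0
      rw [List.getD_eq_getElem?_getD, h0]
      rfl
    have hdrop' : l' = y.drop (j + 1) := by
      have : y.drop (j + 1) = (y.drop j).drop 1 := by rw [List.drop_drop]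
      rw [this, ← hdrop, List.drop_one, List.tail_cons]
    rw [List.foldl_cons, ← hget]
    apply ih (j + 1) _ hdrop' (by simp at hlen ⊢; omega)
    exact procChar_inv x y j tails hinv

lemma innerHS_eq (x y : List Char) :
    innerHS x y = ((lcsT x y x.length y.length : Nat) : Int) := by
  unfold innerHS
  have h0 : Itails x y 0 [] := by
    refine ⟨by simp [lcsT_zero_right], ?_⟩
    intro v i him
    constructor
    · intro hv
      rw [lcsT_zero_right] at hv
      omega
    · rintro ⟨hv, _⟩
      simp at hv
  have hfin := foldHS_inv x y y 0 [] (by simp) (by simp) h0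
  simp only [PySem.List.len_eq]
  rw [hfin.1]

-- ===== joining up =====

lemma inner_eq (x y : List Char) : innerA x y = innerHS x y := by
  rw [innerA_eq, innerHS_eq]

lemma max_eq_ite (b v : Int) : max b v = if v > b then v else b := by
  rw [max_def]; split_ifs <;> omega

lemma loops_eq (s : List Char) : ∀ (ks : List Int) (best : Int),
    solveLoopA s ks best = solveLoopB s ks best := by
  intro ks
  induction ks with
  | nil => intro best; rfl
  | cons k rest ih =>
    intro best
    by_cases h : PySem.List.len (PySem.List.slice s (some k)) ≤ best
    · simp only [solveLoopA, solveLoopB, if_pos h]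
    · simp only [solveLoopA, solveLoopB, if_neg h]
      rw [inner_eq, max_eq_ite, ih]

-- ===== VERDICT (by name: the statement is the Claim_ definition above) =====
theorem solve_spec : Claim_equal_solve := by
  intro args _
  unfold Spec_solve solve solve_alt
  rw [loops_eq]
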